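-- pv_equiv track=rewrite | github.com/nk7062742-png/Better_me_Better_Us-API-Backend | services/chat-api/app/core/prompts.py | _render_snippets
-- ===== SOURCE A (Python) =====
-- from typing import List, Dict
--
-- def _render_snippets(snippets: List[str], max_chars: int = 1600) -> str:
--     if not snippets:
--         return "none"
--     out, total = [], 0
--     for s in snippets:
--         if total + len(s) > max_chars:
--             break
--         out.append(s)
--         total += len(s)
--     return "\n- " + "\n- ".join(out)
-- ===== SOURCE B (Python) =====
-- def _render_snippets(snippets, max_chars=1600):
--     if not snippets:
--         return "none"
--     # prefix[i] = total length of the first i snippets (non-decreasing)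
--     prefix = [0]
--     for s in snippets:
--         prefix.append(prefix[-1] + len(s))
--     # hand-rolled bisect_right: insertion point of max_chars in prefix
--     lo, hi = 0, len(prefix)
--     while lo < hi:
--         mid = (lo + hi) // 2
--         if prefix[mid] <= max_chars:
--             lo = mid + 1
--         else:
--             hi = mid
--     k = max(lo - 1, 0)  # largest prefix count whose total stays within budget
--     return "\n- " + "\n- ".join(snippets[:k])
-- ===== Notes on version B (the rewrite author's own statement) =====
-- stated objective: alternative
-- what changed: Replaces A's single accumulate-and-break loop with a prefix-sum table plus a hand-rolled binary search (bisect_right) for the cutoff count, then one slice-and-join.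
import Mathlib
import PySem

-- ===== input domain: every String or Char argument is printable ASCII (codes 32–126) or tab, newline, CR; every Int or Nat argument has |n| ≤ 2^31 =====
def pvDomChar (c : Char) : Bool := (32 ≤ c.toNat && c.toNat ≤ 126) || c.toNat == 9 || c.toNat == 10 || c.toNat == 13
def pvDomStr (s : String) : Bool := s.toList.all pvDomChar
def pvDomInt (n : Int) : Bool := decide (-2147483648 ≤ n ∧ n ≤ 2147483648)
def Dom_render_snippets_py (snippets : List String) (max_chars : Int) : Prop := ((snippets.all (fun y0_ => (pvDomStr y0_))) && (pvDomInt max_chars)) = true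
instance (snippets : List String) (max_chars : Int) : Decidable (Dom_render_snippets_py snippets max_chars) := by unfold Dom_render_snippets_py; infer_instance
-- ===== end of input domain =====

-- B replaces A's accumulate-and-break loop by a prefix-sum table plus binary search (alternative decomposition, same result).

-- ===== PORT A =====
-- A's for-loop with break: accumulate snippets while total stays within budget.
def aLoop (m : Int) : List String → List String → Int → List String
  | [], out, _ => out
  | s :: rest, out, total =>
    if total + PySem.Str.len s > m then out
    else aLoop m rest (out ++ [s]) (total + PySem.Str.len s)

def render_snippets_py (snippets : List String) (max_chars : Int) : String :=
  if snippets = [] then "none"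
  else "\n- " ++ PySem.Str.join "\n- " (aLoop max_chars snippets [] 0)

-- ===== PORT B =====
-- prefix = [0]; for s in snippets: prefix.append(prefix[-1] + len(s))
def bPrefix (snippets : List String) : List Int :=
  snippets.foldl (fun p s => p ++ [p.getLast! + PySem.Str.len s]) [0]

-- hand-rolled bisect_right loop; pfx[mid] is always in range in B, so getD is exact
def bSearch (pfx : List Int) (x : Int) (lo hi : Nat) : Nat :=
  if h : lo < hi then
    let mid := (lo + hi) / 2
    if pfx.getD mid 0 ≤ x then bSearch pfx x (mid + 1) hi
    else bSearch pfx x lo mid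
  else lo
termination_by hi - lo
decreasing_by all_goals omega

def render_snippets_py_alt (snippets : List String) (max_chars : Int) : String :=
  if snippets = [] then "none"
  else
    let pfx := bPrefix snippets
    let lo := bSearch pfx max_chars 0 pfx.length
    let k := lo - 1  -- Nat subtraction is exactly Python's max(lo - 1, 0)
    -- snippets[:k] with k a nonnegative int is exactly List.take k
    "\n- " ++ PySem.Str.join "\n- " (snippets.take k)

-- ===== PRECONDITION & SPEC =====
def Spec_render_snippets_py (snippets : List String) (max_chars : Int) (out : String) : Prop := out = render_snippets_py_alt snippets max_chars
instance (snippets : List String) (max_chars : Int) (out : String) : Decidable (Spec_render_snippets_py snippets max_chars out) := by unfold Spec_render_snippets_py; infer_instance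

-- ===== CLAIM (what is proved, stated in full; the proofs are below) =====
def Claim_equal_render_snippets_py : Prop := ∀ (snippets : List String) (max_chars : Int), Dom_render_snippets_py snippets max_chars → Spec_render_snippets_py snippets max_chars (render_snippets_py snippets max_chars)

-- ===== LEMMAS AND PROOFS =====

-- pre l i = total length of the first i snippets
def preS (l : List String) (i : Nat) : Int := ((l.take i).map PySem.Str.len).sum

-- the tail of the prefix list, starting from accumulated total t
def scanFrom (t : Int) : List String → List Int
  | [] => []
  | s :: r => (t + PySem.Str.len s) :: scanFrom (t + PySem.Str.len s) r

-- how many snippets A keeps, starting from accumulated total t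
def cutA (m : Int) : List String → Int → Nat
  | [], _ => 0
  | s :: r, t => if t + PySem.Str.len s > m then 0 else cutA m r (t + PySem.Str.len s) + 1

theorem preS_zero (l : List String) : preS l 0 = 0 := by simp [preS]

theorem preS_nonneg (l : List String) (i : Nat) : 0 ≤ preS l i := by
  apply List.sum_nonneg
  intro x hx
  simp only [List.mem_map] at hx
  obtain ⟨s, _, rfl⟩ := hx
  simp [PySem.Str.len_eq]

theorem foldl_bstep (l : List String) (p : List Int) :
    l.foldl (fun p s => p ++ [p.getLast! + PySem.Str.len s]) p
      = p ++ scanFrom p.getLast! l := by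
  induction l generalizing p with
  | nil => simp [scanFrom]
  | cons s r ih =>
    simp only [List.foldl_cons]
    rw [ih]
    simp [scanFrom]

theorem bPrefix_eq (l : List String) : bPrefix l = 0 :: scanFrom 0 l := by
  rw [bPrefix, foldl_bstep]
  simp [List.getLast!]

theorem scanFrom_length (t : Int) (l : List String) : (scanFrom t l).length = l.length := by
  induction l generalizing t with
  | nil => rfl
  | cons s r ih => simp [scanFrom, ih]

theorem scanFrom_getD (t : Int) (l : List String) (i : Nat) (hi : i < l.length) :
    (scanFrom t l).getD i 0 = t + preS l (i + 1) := by
  induction l generalizing t i with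
  | nil => simp at hi
  | cons s r ih =>
    cases i with
    | zero => simp [scanFrom, preS]
    | succ j =>
      simp only [scanFrom, List.getD_cons_succ]
      rw [ih _ j (by simpa using hi)]
      simp [preS, List.take_succ_cons]
      ring

theorem preS_take_succ (l : List String) (i : Nat) :
    preS l (i + 1) = preS l i + ((l[i]?.toList).map PySem.Str.len).sum := by
  simp [preS, List.take_add_one]

theorem preS_mono (l : List String) {i j : Nat} (h : i ≤ j) : preS l i ≤ preS l j := by
  induction j with
  | zero => simp_all
  | succ k ih =>
    rcases Nat.lt_or_ge i (k + 1) with hlt | hge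
    · have := ih (by omega)
      rw [preS_take_succ]
      have h0 : 0 ≤ ((l[k]?.toList).map PySem.Str.len).sum := by
        apply List.sum_nonneg
        intro x hx
        simp only [List.mem_map] at hx
        obtain ⟨s, _, rfl⟩ := hx
        simp [PySem.Str.len_eq]
      omega
    · have : i = k + 1 := by omega
      simp [this]


theorem preS_cons (s : String) (r : List String) (k : Nat) :
    preS (s :: r) (k + 1) = PySem.Str.len s + preS r k := by
  simp [preS]

theorem bPrefix_length (l : List String) : (bPrefix l).length = l.length + 1 := by
  simp [bPrefix_eq, scanFrom_length]

theorem bPrefix_getD (l : List String) (i : Nat) (hi : i ≤ l.length) :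
    (bPrefix l).getD i 0 = preS l i := by
  rw [bPrefix_eq]
  cases i with
  | zero => simp [preS_zero]
  | succ j =>
    simp only [List.getD_cons_succ]
    rw [scanFrom_getD 0 l j (by omega)]
    omega

theorem bSearch_spec (pfx : List Int) (x : Int) (n : Nat)
    (mono : ∀ i j, i ≤ j → j < n → pfx.getD i 0 ≤ pfx.getD j 0) :
    ∀ fuel lo hi, hi - lo ≤ fuel → lo ≤ hi → hi ≤ n →
      (∀ i, i < lo → pfx.getD i 0 ≤ x) →
      (∀ i, hi ≤ i → i < n → ¬ pfx.getD i 0 ≤ x) →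
      lo ≤ bSearch pfx x lo hi ∧ bSearch pfx x lo hi ≤ hi ∧
      (∀ i, i < bSearch pfx x lo hi → pfx.getD i 0 ≤ x) ∧
      (∀ i, bSearch pfx x lo hi ≤ i → i < n → ¬ pfx.getD i 0 ≤ x) := by
  intro fuel
  induction fuel with
  | zero =>
    intro lo hi hf hlh hn hlow hhigh
    have : ¬ lo < hi := by omega
    rw [bSearch, dif_neg this]
    refine ⟨le_rfl, hlh, hlow, ?_⟩
    intro i hri hin
    exact hhigh i (by omega) hin
  | succ f ih =>
    intro lo hi hf hlh hn hlow hhigh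
    by_cases h : lo < hi
    · rw [bSearch, dif_pos h]
      simp only []
      set mid := (lo + hi) / 2 with hmid
      have hmlo : lo ≤ mid := by omega
      have hmhi : mid < hi := by omega
      by_cases hc : pfx.getD mid 0 ≤ x
      · rw [if_pos hc]
        have hres := ih (mid + 1) hi (by omega) (by omega) hn
          (fun i hi' => by
            rcases Nat.lt_or_ge i lo with h1 | h1
            · exact hlow i h1
            · exact le_trans (mono i mid (by omega) (by omega)) hc)
          hhigh
        exact ⟨by omega, hres.2.1, hres.2.2.1, hres.2.2.2⟩
      · rw [if_neg hc]
        have hres := ih lo mid (by omega) (by omega) (by omega) hlow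
          (fun i hi' hin => by
            intro hle
            exact hc (le_trans (mono mid i hi' hin) hle))
        exact ⟨hres.1, by omega, hres.2.2.1, hres.2.2.2⟩
    · rw [bSearch, dif_neg h]
      refine ⟨le_rfl, hlh, hlow, ?_⟩
      intro i hri hin
      exact hhigh i (by omega) hin

theorem aLoop_eq (m : Int) : ∀ (l out : List String) (total : Int),
    aLoop m l out total = out ++ l.take (cutA m l total) := by
  intro l
  induction l with
  | nil => intro out total; simp [aLoop, cutA]
  | cons s r ih =>
    intro out total
    by_cases h : m < total + PySem.Str.len s
    · simp only [aLoop, cutA]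
      rw [if_pos h, if_pos h]
      simp
    · simp only [aLoop, cutA]
      rw [if_neg h, if_neg h, ih]
      simp [List.take_succ_cons]

theorem cutA_spec (m : Int) : ∀ (l : List String) (t : Int),
    cutA m l t ≤ l.length ∧
    (∀ i, i < cutA m l t → t + preS l (i + 1) ≤ m) ∧
    (cutA m l t < l.length → t + preS l (cutA m l t + 1) > m) := by
  intro l
  induction l with
  | nil => intro t; simp [cutA]
  | cons s r ih =>
    intro t
    by_cases h : m < t + PySem.Str.len s
    · refine ⟨?_, ?_, ?_⟩
      · simp only [cutA]; rw [if_pos h]; omega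
      · intro i hi
        simp only [cutA] at hi; rw [if_pos h] at hi; omega
      · intro _
        simp only [cutA]; rw [if_pos h]
        rw [preS_cons, preS_zero]
        omega
    · obtain ⟨ih1, ih2, ih3⟩ := ih (t + PySem.Str.len s)
      refine ⟨?_, ?_, ?_⟩
      · simp only [cutA, List.length_cons]; rw [if_neg h]; omega
      · intro i hi
        simp only [cutA] at hi; rw [if_neg h] at hi
        cases i with
        | zero => rw [preS_cons, preS_zero]; omega
        | succ j =>
          rw [preS_cons]
          have := ih2 j (by omega)
          omega
      · simp only [cutA, List.length_cons]; rw [if_neg h]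
        intro hlt
        rw [preS_cons]
        have := ih3 (by omega)
        omega

-- ===== VERDICT (by name: the statement is the Claim_ definition above) =====
theorem render_snippets_py_spec : Claim_equal_render_snippets_py := by
  intro l m _dom
  unfold Spec_render_snippets_py render_snippets_py render_snippets_py_alt
  by_cases hne : l = []
  · simp [hne]
  · rw [if_neg hne, if_neg hne]
    simp only []
    set n := l.length with hn
    have hplen : (bPrefix l).length = n + 1 := bPrefix_length l
    have hmono : ∀ i j, i ≤ j → j < n + 1 → (bPrefix l).getD i 0 ≤ (bPrefix l).getD j 0 := by
      intro i j hij hj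
      rw [bPrefix_getD l i (by omega), bPrefix_getD l j (by omega)]
      exact preS_mono l hij
    have hspec := bSearch_spec (bPrefix l) m (n + 1) hmono (n + 1) 0 (n + 1)
      (by omega) (by omega) le_rfl (by omega) (by omega)
    rw [hplen]
    set r := bSearch (bPrefix l) m 0 (n + 1) with hr
    obtain ⟨_, hr2, hr3, hr4⟩ := hspec
    have hr3' : ∀ i, i < r → preS l i ≤ m := by
      intro i hi
      have := hr3 i hi
      rwa [bPrefix_getD l i (by omega)] at this
    have hr4' : ∀ i, r ≤ i → i ≤ n → ¬ preS l i ≤ m := by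
      intro i h1 h2
      have := hr4 i h1 (by omega)
      rwa [bPrefix_getD l i (by omega)] at this
    obtain ⟨hc1, hc2, hc3⟩ := cutA_spec m l 0
    set c := cutA m l 0 with hc
    have hc2' : ∀ i, i < c → preS l (i + 1) ≤ m := by
      intro i hi; have := hc2 i hi; omega
    have hkey : r - 1 = c := by
      by_cases hm : 0 ≤ m
      · have hr1 : 1 ≤ r := by
          by_contra hcon
          have := hr4' 0 (by omega) (by omega)
          rw [preS_zero] at this
          omega
        have hle : r ≤ c + 1 := by
          by_contra hcon
          have h1 := hr3' (c + 1) (by omega)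
          have h2 := hc3 (by omega)
          omega
        have hge : c + 1 ≤ r := by
          by_contra hcon
          have h1 := hr4' r (le_rfl) (by omega)
          have h2 := hc2' (r - 1) (by omega)
          have : r - 1 + 1 = r := by omega
          rw [this] at h2
          omega
        omega
      · have hr0 : r = 0 := by
          by_contra hcon
          have := hr3' 0 (by omega)
          rw [preS_zero] at this
          omega
        have hc0 : c = 0 := by
          by_contra hcon
          have h1 := hc2' 0 (by omega)
          have h2 := preS_nonneg l 1
          norm_num at h1
          omega
        omega
    rw [aLoop_eq m l [] 0, hkey, ← hc]
    simp
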